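-- pv_equiv track=rewrite | github.com/ZeroWangZY/vae-for-vis | data-generator/image_generator.py | dict2arr
-- ===== SOURCE A (Python) =====
-- def dict2arr(dict_arr):
--     keys = list(dict_arr[0].keys())
--     length_of_keys = len(keys)
--     length_of_dict_arr = len(dict_arr)
--     ret = [[] for i in range(length_of_keys)]
--     for i in range(length_of_dict_arr):
--         item = dict_arr[i]
--         for j in range(length_of_keys):
--             ret[j].append(item[keys[j]])
--     return ret
-- ===== SOURCE B (Python) =====
-- def dict2arr(dict_arr):
--     keys = list(dict_arr[0].keys())
--     rows = [[d[k] for k in keys] for d in dict_arr]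
--     return [list(col) for col in zip(*rows)]
-- ===== Notes on version B (the rewrite author's own statement) =====
-- stated objective: idiomatic
-- what changed: B first materializes the row-major value matrix in key order and then transposes it with zip(*rows), two staged passes with a rectangular intermediate, instead of A's single interleaved pass appending into pre-allocated column lists by index arithmetic.
import Mathlib
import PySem

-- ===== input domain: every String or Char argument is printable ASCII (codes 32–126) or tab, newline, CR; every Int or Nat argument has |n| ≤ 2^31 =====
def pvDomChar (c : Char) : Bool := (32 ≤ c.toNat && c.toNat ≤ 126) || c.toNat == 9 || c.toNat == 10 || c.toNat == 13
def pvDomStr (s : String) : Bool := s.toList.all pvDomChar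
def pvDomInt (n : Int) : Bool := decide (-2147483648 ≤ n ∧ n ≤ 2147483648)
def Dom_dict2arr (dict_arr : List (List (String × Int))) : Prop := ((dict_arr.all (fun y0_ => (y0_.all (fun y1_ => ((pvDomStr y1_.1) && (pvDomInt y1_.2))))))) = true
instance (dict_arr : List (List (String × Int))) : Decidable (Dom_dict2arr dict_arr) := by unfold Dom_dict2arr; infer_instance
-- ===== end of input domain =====

-- B materializes the row-major value matrix in key order and then transposes it with zip(*rows)
-- (two staged passes), instead of A's interleaved appends into pre-allocated columns.
-- Equivalence is about the return value.

-- ===== PORT A =====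
def dict2arr (dict_arr : List (List (String × Int))) : List (List Int) :=
  let keys := (PySem.Dict.mk (PySem.List.pyGetD dict_arr 0 [])).keys
  let length_of_keys := PySem.List.len keys
  let length_of_dict_arr := PySem.List.len dict_arr
  let ret := (PySem.List.pyRange 0 length_of_keys 1).map (fun _ => ([] : List Int))
  (PySem.List.pyRange 0 length_of_dict_arr 1).foldl (fun ret i =>
    let item := PySem.List.pyGetD dict_arr i []
    (PySem.List.pyRange 0 length_of_keys 1).foldl (fun r j =>
      PySem.List.pySetD r j
        (PySem.List.pyGetD r j [] ++
          [(PySem.Dict.mk item).getD (PySem.List.pyGetD keys j "") 0])) ret) ret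

-- ===== PORT B =====
-- Python's zip(*rows): take one element from each row until some row is exhausted.
def pvZipStar (rows : List (List Int)) : List (List Int) :=
  if h : rows.isEmpty = true ∨ rows.any (fun r => r.isEmpty) = true then []
  else (rows.map (fun r => r.headD 0)) :: pvZipStar (rows.map (fun r => r.tail))
termination_by (rows.headD []).length
decreasing_by
  push Not at h
  obtain ⟨h1, h2⟩ := h
  cases rows with
  | nil => simp at h1
  | cons r rs =>
    have hr : r ≠ [] := by
      intro hc; apply h2; simp [hc]
    simp only [List.map_cons, List.headD_cons]
    cases r with
    | nil => exact absurd rfl hr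
    | cons x xs => simp

def dict2arr_alt (dict_arr : List (List (String × Int))) : List (List Int) :=
  let keys := (PySem.Dict.mk (PySem.List.pyGetD dict_arr 0 [])).keys
  let rows := dict_arr.map (fun d => keys.map (fun k => (PySem.Dict.mk d).getD k 0))
  pvZipStar rows

-- ===== PRECONDITION & SPEC =====
-- Pre_ excludes exactly the inputs where Python A raises: the empty list (IndexError on dict_arr[0])
-- and lists where some dict lacks a key of the first dict (KeyError).
def Pre_dict2arr (dict_arr : List (List (String × Int))) : Prop :=
  (!dict_arr.isEmpty &&
    dict_arr.all (fun d => (dict_arr.headD []).all (fun kv => (PySem.Dict.mk d).contains kv.1))) = true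
instance (dict_arr : List (List (String × Int))) : Decidable (Pre_dict2arr dict_arr) := by
  unfold Pre_dict2arr; infer_instance

def pvWitness_dict2arr : (List (List (String × Int))) :=
  [[("a", 1), ("b", 2)], [("b", 4), ("a", 3)]]

def Spec_dict2arr (dict_arr : List (List (String × Int))) (out : List (List Int)) : Prop := out = dict2arr_alt dict_arr
instance (dict_arr : List (List (String × Int))) (out : List (List Int)) : Decidable (Spec_dict2arr dict_arr out) := by unfold Spec_dict2arr; infer_instance

-- ===== CLAIM (what is proved, stated in full; the proofs are below) =====
def Claim_equal_dict2arr : Prop := ∀ (dict_arr : List (List (String × Int))), Dom_dict2arr dict_arr → Pre_dict2arr dict_arr → Spec_dict2arr dict_arr (dict2arr dict_arr)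

-- ===== LEMMAS AND PROOFS =====

-- value looked up for key k in dict d
def pvVal (d : List (String × Int)) (k : String) : Int := (PySem.Dict.mk d).getD k 0

-- A's inner loop over range(len(keys)), as a function of the current columns r
def pvInner (keys : List String) (item : List (String × Int)) (r : List (List Int)) : List (List Int) :=
  (PySem.List.pyRange 0 (PySem.List.len keys) 1).foldl (fun r j =>
    PySem.List.pySetD r j
      (PySem.List.pyGetD r j [] ++ [(PySem.Dict.mk item).getD (PySem.List.pyGetD keys j "") 0])) r

lemma pvInner_gen (keys : List String) (item : List (String × Int)) :
    ∀ (a : Nat) (r : List (List Int)), r.length = keys.length →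
      (PySem.List.pyRange (a : Int) (PySem.List.len keys) 1).foldl (fun r j =>
          PySem.List.pySetD r j
            (PySem.List.pyGetD r j [] ++ [(PySem.Dict.mk item).getD (PySem.List.pyGetD keys j "") 0])) r
        = r.take a ++ List.zipWith (fun col k => col ++ [pvVal item k]) (r.drop a) (keys.drop a) := by
  intro a
  induction h : keys.length - a using Nat.strong_induction_on generalizing a with
  | _ n ih =>
    intro r hr
    by_cases hab : a < keys.length
    · rw [PySem.List.pyRange_one_cons (by simp [PySem.List.len]; omega)]
      simp only [List.foldl_cons]
      have hset : PySem.List.pySetD r (a : Int)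
          (PySem.List.pyGetD r (a : Int) [] ++ [(PySem.Dict.mk item).getD (PySem.List.pyGetD keys (a : Int) "") 0])
          = r.set a (r.getD a [] ++ [pvVal item (keys.getD a "")]) := by
        simp [PySem.List.pySetD_natCast, PySem.List.pyGetD_natCast, pvVal]
      rw [hset]
      have h1 : ((a : Int) + 1) = ((a + 1 : Nat) : Int) := by push_cast; ring
      rw [h1, ih (keys.length - (a + 1)) (by omega) (a + 1) rfl _ (by simp [hr])]
      have hra : a < r.length := by omega
      have hgetr : r.getD a [] = r[a] := List.getD_eq_getElem r [] hra
      have hgetk : keys.getD a "" = keys[a] := List.getD_eq_getElem keys "" hab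
      rw [hgetr, hgetk]
      rw [List.set_eq_take_append_cons_drop, if_pos hra]
      have htake : (r.take a ++ (r[a] ++ [pvVal item keys[a]]) :: r.drop (a + 1)).take (a + 1)
          = r.take a ++ [r[a] ++ [pvVal item keys[a]]] := by
        rw [List.take_append]
        simp [List.length_take, Nat.min_eq_left (le_of_lt hra), List.take_succ_cons]
      have hdrop : (r.take a ++ (r[a] ++ [pvVal item keys[a]]) :: r.drop (a + 1)).drop (a + 1)
          = r.drop (a + 1) := by
        rw [List.drop_append]
        simp [List.length_take, Nat.min_eq_left (le_of_lt hra)]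
      rw [htake, hdrop]
      have hdr : r.drop a = r[a] :: r.drop (a + 1) := by
        rw [List.drop_eq_getElem_cons hra]
      have hdk : keys.drop a = keys[a] :: keys.drop (a + 1) := by
        rw [List.drop_eq_getElem_cons hab]
      rw [hdr, hdk, List.zipWith_cons_cons, List.append_assoc]
      simp
    · have : keys.length ≤ a := by omega
      rw [PySem.List.pyRange_one_eq_nil (by simp [PySem.List.len]; omega)]
      simp [List.foldl_nil, List.drop_eq_nil_of_le this, List.drop_eq_nil_of_le (hr ▸ this),
        List.take_of_length_le (hr ▸ this)]

lemma pvInner_eq (keys : List String) (item : List (String × Int)) (r : List (List Int))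
    (hr : r.length = keys.length) :
    pvInner keys item r = List.zipWith (fun col k => col ++ [pvVal item k]) r keys := by
  have := pvInner_gen keys item 0 r hr
  simpa [pvInner] using this

lemma pvZip_zip {α β γ δ : Type} (f : γ → β → δ) (g : α → β → γ) :
    ∀ (xs : List α) (ys : List β),
      List.zipWith f (List.zipWith g xs ys) ys = List.zipWith (fun x y => f (g x y) y) xs ys := by
  intro xs
  induction xs with
  | nil => intro ys; simp
  | cons x xs ih => intro ys; cases ys <;> simp [ih]

lemma pvZip_self {α β : Type} (f : α → β → α) (hf : ∀ a b, f a b = a) :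
    ∀ (xs : List α) (ys : List β), xs.length = ys.length → List.zipWith f xs ys = xs := by
  intro xs
  induction xs with
  | nil => intro ys _; simp
  | cons x xs ih =>
    intro ys h
    cases ys with
    | nil => simp at h
    | cons y ys => simp [hf, ih ys (by simpa using h)]

lemma pvOuter (keys : List String) :
    ∀ (rows : List (List (String × Int))) (acc : List (List Int)), acc.length = keys.length →
      rows.foldl (fun ret item => pvInner keys item ret) acc
        = List.zipWith (fun col k => col ++ rows.map (fun d => pvVal d k)) acc keys := by
  intro rows
  induction rows with
  | nil =>
    intro acc hacc
    simp only [List.foldl_nil, List.map_nil, List.append_nil]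
    exact (pvZip_self _ (fun _ _ => rfl) acc keys hacc).symm
  | cons r rs ih =>
    intro acc hacc
    simp only [List.foldl_cons]
    rw [pvInner_eq keys r acc hacc,
      ih _ (by simp [List.length_zipWith, hacc]),
      pvZip_zip]
    simp [List.append_assoc]

lemma pvZip_replicate {α β : Type} (f : α → β → α) (c : α) :
    ∀ (ys : List β), List.zipWith f (List.replicate ys.length c) ys = ys.map (f c) := by
  intro ys
  induction ys with
  | nil => simp
  | cons y ys ih => simp [List.replicate_succ, ih]

-- A in canonical column form
lemma pvA_canon (dict_arr : List (List (String × Int))) :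
    dict2arr dict_arr
      = ((PySem.Dict.mk (PySem.List.pyGetD dict_arr 0 [])).keys).map
          (fun k => dict_arr.map (fun d => pvVal d k)) := by
  unfold dict2arr
  set keys := (PySem.Dict.mk (PySem.List.pyGetD dict_arr 0 [])).keys with hk
  simp only []
  have hret0 : (PySem.List.pyRange 0 (PySem.List.len keys) 1).map (fun _ => ([] : List Int))
      = List.replicate keys.length ([] : List Int) := by
    rw [List.map_const']
    congr 1
    simp [PySem.List.length_pyRange_one, PySem.List.len]
  have houter : (PySem.List.pyRange 0 (PySem.List.len dict_arr) 1).foldl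
      (fun ret i =>
        (PySem.List.pyRange 0 (PySem.List.len keys) 1).foldl (fun r j =>
          PySem.List.pySetD r j
            (PySem.List.pyGetD r j [] ++
              [(PySem.Dict.mk (PySem.List.pyGetD dict_arr i [])).getD (PySem.List.pyGetD keys j "") 0])) ret)
      (List.replicate keys.length ([] : List Int))
      = dict_arr.foldl (fun ret item => pvInner keys item ret)
          (List.replicate keys.length ([] : List Int)) := by
    exact PySem.List.foldl_pyRange_zero_pyGetD dict_arr []
      (fun ret item => pvInner keys item ret) _
  rw [hret0, houter, pvOuter keys dict_arr _ (by simp)]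
  have := pvZip_replicate (fun (col : List Int) (k : String) =>
    col ++ dict_arr.map (fun d => pvVal d k)) ([] : List Int) keys
  simpa [pvVal] using this

-- B's zip(*) transpose of a rectangular row-major matrix is the canonical column form
lemma pvZipStar_map {α : Type} (f : α → String → Int) :
    ∀ (keys : List String) (l : List α), l ≠ [] →
      pvZipStar (l.map (fun d => keys.map (f d)))
        = keys.map (fun k => l.map (fun d => f d k)) := by
  intro keys
  induction keys with
  | nil =>
    intro l hl
    rw [pvZipStar]
    rw [dif_pos]
    · simp
    · right
      cases l with
      | nil => exact absurd rfl hl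
      | cons d ds => simp
  | cons k ks ih =>
    intro l hl
    rw [pvZipStar]
    have hcond : ¬((l.map (fun d => (k :: ks).map (f d))).isEmpty = true ∨
        (l.map (fun d => (k :: ks).map (f d))).any (fun r => r.isEmpty) = true) := by
      push Not
      constructor
      · cases l with
        | nil => exact absurd rfl hl
        | cons d ds => simp
      · simp
    rw [dif_neg hcond]
    simp only [List.map_map, List.map_cons]
    have hheads : l.map ((fun (r : List Int) => r.headD 0) ∘ fun d => f d k :: List.map (f d) ks)
        = l.map (fun d => f d k) := by
      simp [Function.comp_def]
    have htails : l.map ((fun (r : List Int) => r.tail) ∘ fun d => f d k :: List.map (f d) ks)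
        = l.map (fun d => ks.map (f d)) := by
      simp [Function.comp_def]
    rw [hheads, htails, ih l hl]
-- ===== VERDICT (by name: the statement is the Claim_ definition above) =====

theorem dict2arr_spec : Claim_equal_dict2arr := by
  intro dict_arr _ hpre
  unfold Spec_dict2arr dict2arr_alt
  have hne : dict_arr ≠ [] := by
    intro hc
    subst hc
    simp [Pre_dict2arr] at hpre
  rw [pvA_canon]
  set keys := (PySem.Dict.mk (PySem.List.pyGetD dict_arr 0 [])).keys with hk
  simp only []
  rw [pvZipStar_map (fun d k => (PySem.Dict.mk d).getD k 0) keys dict_arr hne]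
  simp [pvVal]
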